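-- pv_equiv track=rewrite | github.com/spbupos/sudoku-solver | solver.py | fail_in_3x3
-- ===== SOURCE A (Python) =====
-- def fail_in_3x3(row, col, sudoku):
--     x3 = []
--     r_start = 3 * (row // 3)
--     c_start = 3 * (col // 3)
--     for r in range(3):
--         for c in range(3):
--             if sudoku[r_start + r][c_start + c] == 0:
--                 continue
--             if not sudoku[r_start + r][c_start + c] in x3:
--                 x3.append(sudoku[r_start + r][c_start + c])
--             else:
--                 return True
--     return False
-- ===== SOURCE B (Python) =====
-- def fail_in_3x3(row, col, sudoku):
--     r_start = 3 * (row // 3)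
--     c_start = 3 * (col // 3)
--     cells = [sudoku[r_start + r][c_start + c] for r in range(3) for c in range(3)]
--
--     def has_dup(rest):
--         if not rest:
--             return False
--         head, tail = rest[0], rest[1:]
--         return (head != 0 and head in tail) or has_dup(tail)
--
--     return has_dup(cells)
-- ===== Notes on version B (the rewrite author's own statement) =====
-- stated objective: alternative
-- what changed: Replaces A's incremental seen-list with membership test and early return by a gather of the nine box cells followed by a recursive pairwise check: does any nonzero value recur in the rest of the list (no auxiliary structure maintained).
-- outside the precondition, e.g. on fail_in_3x3(0, 0, [[1, 1]]): A returns True, B raises IndexError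
import Mathlib
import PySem

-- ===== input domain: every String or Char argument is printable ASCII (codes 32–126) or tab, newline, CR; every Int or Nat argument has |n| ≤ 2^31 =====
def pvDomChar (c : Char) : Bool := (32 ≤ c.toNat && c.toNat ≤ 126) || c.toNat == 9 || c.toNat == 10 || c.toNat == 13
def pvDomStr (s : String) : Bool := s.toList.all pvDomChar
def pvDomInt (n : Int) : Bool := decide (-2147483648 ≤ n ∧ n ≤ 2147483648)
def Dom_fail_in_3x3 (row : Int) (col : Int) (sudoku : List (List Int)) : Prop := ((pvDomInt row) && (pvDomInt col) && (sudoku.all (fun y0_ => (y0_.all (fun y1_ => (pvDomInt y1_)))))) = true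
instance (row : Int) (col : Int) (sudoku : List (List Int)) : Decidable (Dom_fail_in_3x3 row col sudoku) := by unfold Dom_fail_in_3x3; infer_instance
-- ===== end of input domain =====

-- B gathers the nine box cells then recursively checks whether any nonzero value recurs in the
-- rest of the list (pairwise, no seen-structure), instead of A's incremental seen-list loop with
-- early return; equal on Pre_ (all nine cell accesses in range).


-- ===== PORT A =====
-- sudoku[i][j], totalised with defaults; exact under Pre_ (every access in range)
def pvCell (sudoku : List (List Int)) (i j : Int) : Int :=
  PySem.List.pyGetD (PySem.List.pyGetD sudoku i []) j 0

-- inner 'for c in range(3)' loop: returns none on 'return True', else the updated x3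
def pvInnerA (sudoku : List (List Int)) (ri c_start : Int) (x3 : List Int) : List Int → Option (List Int)
  | [] => some x3
  | c :: cs =>
    let v := pvCell sudoku ri (c_start + c)
    if v = 0 then pvInnerA sudoku ri c_start x3 cs
    else if v ∉ x3 then pvInnerA sudoku ri c_start (x3 ++ [v]) cs
    else none

-- outer 'for r in range(3)' loop
def pvOuterA (sudoku : List (List Int)) (r_start c_start : Int) (x3 : List Int) : List Int → Bool
  | [] => false
  | r :: rs =>
    match pvInnerA sudoku (r_start + r) c_start x3 (PySem.List.pyRange 0 3 1) with
    | none => true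
    | some x3' => pvOuterA sudoku r_start c_start x3' rs

def fail_in_3x3 (row : Int) (col : Int) (sudoku : List (List Int)) : Bool :=
  let r_start := 3 * PySem.Int.floordiv row 3
  let c_start := 3 * PySem.Int.floordiv col 3
  pvOuterA sudoku r_start c_start [] (PySem.List.pyRange 0 3 1)

-- ===== PORT B =====
-- Source B's has_dup: head/tail recursion, nonzero head recurring in the tail
def pvHasDup : List Int → Bool
  | [] => false
  | v :: vs => (decide (v ≠ 0) && vs.contains v) || pvHasDup vs

def fail_in_3x3_alt (row : Int) (col : Int) (sudoku : List (List Int)) : Bool :=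
  let r_start := 3 * PySem.Int.floordiv row 3
  let c_start := 3 * PySem.Int.floordiv col 3
  let cells := (PySem.List.pyRange 0 3 1).flatMap
    (fun r => (PySem.List.pyRange 0 3 1).map (fun c => pvCell sudoku (r_start + r) (c_start + c)))
  pvHasDup cells

-- ===== PRECONDITION & SPEC =====
-- Pre_ requires all nine box cells to be in range (Python index semantics). It excludes inputs
-- where some cell access raises IndexError, including those where A happens to return True from
-- a duplicate found before reaching the out-of-range cell: B's full gather raises there.
def pvPreB (row : Int) (col : Int) (sudoku : List (List Int)) : Bool :=
  (PySem.List.pyRange 0 3 1).all (fun r =>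
    match PySem.List.pyGet? sudoku (3 * PySem.Int.floordiv row 3 + r) with
    | none => false
    | some rl => (PySem.List.pyRange 0 3 1).all
        (fun c => decide (PySem.Raise.InRange rl.length (3 * PySem.Int.floordiv col 3 + c))))

def Pre_fail_in_3x3 (row : Int) (col : Int) (sudoku : List (List Int)) : Prop :=
  pvPreB row col sudoku = true
instance (row : Int) (col : Int) (sudoku : List (List Int)) : Decidable (Pre_fail_in_3x3 row col sudoku) := by
  unfold Pre_fail_in_3x3; infer_instance

def pvWitness_fail_in_3x3 : Int × Int × List (List Int) :=
  (0, 0, [[1, 2, 3], [4, 5, 6], [7, 8, 9]])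

def Spec_fail_in_3x3 (row : Int) (col : Int) (sudoku : List (List Int)) (out : Bool) : Prop := out = fail_in_3x3_alt row col sudoku
instance (row : Int) (col : Int) (sudoku : List (List Int)) (out : Bool) : Decidable (Spec_fail_in_3x3 row col sudoku out) := by unfold Spec_fail_in_3x3; infer_instance

-- ===== CLAIM (what is proved, stated in full; the proofs are below) =====
def Claim_equal_fail_in_3x3 : Prop := ∀ (row : Int) (col : Int) (sudoku : List (List Int)), Dom_fail_in_3x3 row col sudoku → Pre_fail_in_3x3 row col sudoku → Spec_fail_in_3x3 row col sudoku (fail_in_3x3 row col sudoku)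

-- ===== LEMMAS AND PROOFS =====

-- A's loop over a flat list of values
def pvProc (x3 : List Int) : List Int → Option (List Int)
  | [] => some x3
  | v :: vs => if v = 0 then pvProc x3 vs else if v ∉ x3 then pvProc (x3 ++ [v]) vs else none

lemma pvInnerA_eq_proc (sudoku : List (List Int)) (ri c_start : Int) (x3 : List Int) (cs : List Int) :
    pvInnerA sudoku ri c_start x3 cs = pvProc x3 (cs.map (fun c => pvCell sudoku ri (c_start + c))) := by
  induction cs generalizing x3 with
  | nil => rfl
  | cons c cs ih => simp only [pvInnerA, pvProc, List.map]; split_ifs <;> simp [ih]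

lemma pvProc_append (vs ws x3 : List Int) :
    pvProc x3 (vs ++ ws) = (pvProc x3 vs).bind (fun y => pvProc y ws) := by
  induction vs generalizing x3 with
  | nil => rfl
  | cons v vs ih => simp only [pvProc, List.cons_append]; split_ifs <;> simp [ih]

lemma pvOuterA_eq_proc (sudoku : List (List Int)) (r_start c_start : Int) (x3 : List Int) (rs : List Int) :
    pvOuterA sudoku r_start c_start x3 rs =
      ((pvProc x3 (rs.flatMap (fun r => (PySem.List.pyRange 0 3 1).map
          (fun c => pvCell sudoku (r_start + r) (c_start + c))))).elim true (fun _ => false)) := by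
  induction rs generalizing x3 with
  | nil => rfl
  | cons r rs ih =>
    simp only [pvOuterA, List.flatMap_cons, pvProc_append, pvInnerA_eq_proc]
    cases pvProc x3 ((PySem.List.pyRange 0 3 1).map (fun c => pvCell sudoku (r_start + r) (c_start + c))) with
    | none => rfl
    | some y => simpa using ih y

lemma pvProc_none_iff (vs : List Int) : ∀ (x3 : List Int), x3.Nodup →
    (pvProc x3 vs = none ↔ ¬ (x3 ++ vs.filter (fun v => decide (v ≠ 0))).Nodup) := by
  induction vs with
  | nil => intro x3 h; simpa [pvProc] using h
  | cons v vs ih =>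
    intro x3 h
    by_cases hv : v = 0
    · rw [show List.filter (fun v => decide (v ≠ 0)) (v :: vs)
          = List.filter (fun v => decide (v ≠ 0)) vs by simp [hv]]
      simpa [pvProc, hv] using ih x3 h
    · rw [show List.filter (fun v => decide (v ≠ 0)) (v :: vs)
          = v :: List.filter (fun v => decide (v ≠ 0)) vs by simp [hv]]
      by_cases hmem : v ∈ x3
      · simp only [pvProc, if_neg hv, if_neg (not_not_intro hmem)]
        constructor
        · intro _ hn
          have hd := (List.nodup_append.mp hn).2.2
          exact hd v hmem v (List.mem_cons_self ..) rfl
        · intro _; trivial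
      · have h' : (x3 ++ [v]).Nodup := by
          rw [List.nodup_append]
          refine ⟨h, List.nodup_singleton v, ?_⟩
          intro a ha b hb hab
          have hbv : b = v := by simpa using hb
          exact hmem (hbv ▸ hab ▸ ha)
        rw [show x3 ++ v :: List.filter (fun v => decide (v ≠ 0)) vs
            = (x3 ++ [v]) ++ List.filter (fun v => decide (v ≠ 0)) vs by simp]
        simpa [pvProc, hv, hmem] using ih (x3 ++ [v]) h'

-- B's recursive pairwise check detects exactly a duplicate among the nonzero values
lemma pvHasDup_iff (l : List Int) :
    pvHasDup l = true ↔ ¬ (l.filter (fun v => decide (v ≠ 0))).Nodup := by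
  induction l with
  | nil => simp [pvHasDup]
  | cons v vs ih =>
    by_cases hv : v = 0
    · rw [show List.filter (fun v => decide (v ≠ 0)) (v :: vs)
          = List.filter (fun v => decide (v ≠ 0)) vs by simp [hv]]
      simpa [pvHasDup, hv] using ih
    · rw [show List.filter (fun v => decide (v ≠ 0)) (v :: vs)
          = v :: List.filter (fun v => decide (v ≠ 0)) vs by simp [hv]]
      simp only [pvHasDup, Bool.or_eq_true, Bool.and_eq_true, decide_eq_true_eq,
        List.contains_iff_mem, ih, List.nodup_cons]
      constructor
      · rintro (⟨-, hmem⟩ | hnd) hc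
        · exact hc.1 (List.mem_filter.mpr ⟨hmem, by simp [hv]⟩)
        · exact hnd hc.2
      · intro hn
        by_cases hmem : v ∈ vs
        · exact Or.inl ⟨hv, hmem⟩
        · exact Or.inr (fun hnd => hn ⟨fun hf => hmem (List.mem_filter.mp hf).1, hnd⟩)

-- A's early-return loop over a flat value list returns True exactly when B's pairwise check does
lemma pvMain (cells : List Int) :
    (pvProc [] cells).elim true (fun _ => false) = pvHasDup cells := by
  have hkey := pvProc_none_iff cells [] List.nodup_nil
  simp only [List.nil_append] at hkey
  have hd := pvHasDup_iff cells
  cases hp : pvProc [] cells with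
  | none =>
    simp only [Option.elim]
    exact (hd.mpr (hkey.mp hp)).symm
  | some y =>
    simp only [Option.elim]
    have hnd : (cells.filter (fun v => decide (v ≠ 0))).Nodup :=
      not_not.mp (fun hn => by simp [hkey.mpr hn] at hp)
    cases hb : pvHasDup cells
    · rfl
    · exact absurd hnd (hd.mp hb)

-- ===== VERDICT (by name: the statement is the Claim_ definition above) =====
theorem fail_in_3x3_spec : Claim_equal_fail_in_3x3 := by
  intro row col sudoku _ _
  exact (pvOuterA_eq_proc sudoku (3 * PySem.Int.floordiv row 3)
      (3 * PySem.Int.floordiv col 3) [] (PySem.List.pyRange 0 3 1)).trans (pvMain _)
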